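-- pv_equiv track=rewrite | github.com/RonnienNguyen/PythonLeetCode | LeetCode/rollTheString.py | rollTheString
-- ===== SOURCE A (Python) =====
-- def increment_char(c):
--     # Custom function to increment a lowercase character by one
--     if c == 'z':
--         return 'a'
--     return chr(ord(c) + 1)
--
-- def rollTheString(s, roll):
--     n = len(s)
--     result = list(s)
--     roll_sum = 0
--
--     for r in roll:
--         roll_sum += r
--         idx = r if r < n else n
--         for i in range(idx):
--             result[i] = increment_char(result[i])
--
--     return "".join(result)
-- ===== SOURCE B (Python) =====
-- def _bump(o, cnt):
--     # code point o after cnt increment_char steps (the a..z cycle starts at 'z')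
--     if o > 122 or o + cnt <= 122:
--         return o + cnt
--     return 97 + (o + cnt - 123) % 26
--
-- def _shift(seg, cnt):
--     # apply cnt increments to every character of seg at once
--     if cnt == 0 or not seg:
--         return seg
--     return seg.translate([_bump(o, cnt) for o in range(127)])
--
-- def rollTheString(s, roll):
--     # Frequency array of clamped roll values; sweeping it once from the top cuts s
--     # into maximal segments whose characters all receive the same number of
--     # increments, and each segment is shifted in one translate() call.
--     n = len(s)
--     diff = [0] * (n + 1)
--     for r in roll:
--         if r > 0:
--             diff[r if r < n else n] += 1
--     out = []
--     pos = n
--     cnt = 0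
--     for b in range(n, 0, -1):
--         if diff[b]:
--             out.append(_shift(s[b:pos], cnt))
--             cnt += diff[b]
--             pos = b
--     out.append(_shift(s[:pos], cnt))
--     return "".join(reversed(out))
-- ===== Notes on version B (the rewrite author's own statement) =====
-- stated objective: faster
-- what changed: A re-walks the string prefix once per roll (nested loops); B builds a frequency array of the clamped roll values, sweeps it once from the top to cut s into maximal segments whose characters all receive the same number of increments, and shifts each segment with a single precomputed str.translate table (closed-form mod-26 bump instead of repeated increments).
import Mathlib
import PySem

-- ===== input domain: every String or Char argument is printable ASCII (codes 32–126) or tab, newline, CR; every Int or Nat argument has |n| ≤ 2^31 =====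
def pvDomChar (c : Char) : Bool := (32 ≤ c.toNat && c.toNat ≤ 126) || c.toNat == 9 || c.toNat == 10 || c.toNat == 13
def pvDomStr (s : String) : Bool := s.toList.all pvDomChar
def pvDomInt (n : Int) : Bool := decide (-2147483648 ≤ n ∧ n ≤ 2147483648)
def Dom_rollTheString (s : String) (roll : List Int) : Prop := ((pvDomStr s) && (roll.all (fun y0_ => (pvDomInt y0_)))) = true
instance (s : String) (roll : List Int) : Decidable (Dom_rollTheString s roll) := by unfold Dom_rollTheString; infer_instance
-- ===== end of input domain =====

-- B replaces A's per-roll rescan of the string prefix by a frequency array of the clamped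
-- roll values swept once from the top: s is cut into maximal segments whose characters all
-- receive the same number of increments and each segment is shifted by one translate table
-- (objective: faster). Both ports carry characters as integer code points (ord/chr is exact
-- on Nat codes).


-- ===== PORT A =====
-- increment_char on code points ('z' has code 122, 'a' has code 97; chr(ord(c)+1) is o+1)
def pvIncCode (o : Nat) : Nat := if o = 122 then 97 else o + 1

-- the inner 'for i in range(idx): result[i] = increment_char(result[i])'
def pvInnerLoop (res : List Nat) (idx : Int) : List Nat :=
  (PySem.List.pyRange 0 idx 1).foldl
    (fun acc i =>
      match PySem.List.pyGet? acc i with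
      | some o => acc.set i.toNat (pvIncCode o)
      | none => acc) res

def rollTheString (s : String) (roll : List Int) : String :=
  let n : Int := (s.toList.length : Int)
  let result := s.toList.map Char.toNat        -- result = list(s), as code points
  let st := roll.foldl
    (fun (st : Int × List Nat) r =>
      let idx : Int := if r < n then r else n
      (st.1 + r, pvInnerLoop st.2 idx)) (0, result)
  String.mk (st.2.map Char.ofNat)              -- "".join(result)

-- ===== PORT B =====
-- _bump: code point o after cnt increment_char steps (closed form)
def pvBump (o : Nat) (cnt : Nat) : Nat :=
  if 122 < o ∨ o + cnt ≤ 122 then o + cnt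
  else 97 + (o + cnt - 123) % 26

-- _shift: str.translate with a length-127 list table — code points below 127 go through
-- the table, larger ones are left unchanged (exact for a 127-entry table)
def pvShift (seg : List Nat) (cnt : Nat) : List Nat :=
  if cnt = 0 ∨ seg = [] then seg
  else
    let table := (List.range 127).map (fun o => pvBump o cnt)
    seg.map (fun o => if o < 127 then table.getD o o else o)

def rollTheString_alt (s : String) (roll : List Int) : String :=
  let codes := s.toList.map Char.toNat
  let n := codes.length
  let diff : List Nat := roll.foldl
    (fun d r =>
      if 0 < r then
        let j := (if r < (n : Int) then r else (n : Int)).toNat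
        d.set j (d.getD j 0 + 1)
      else d) (List.replicate (n + 1) 0)
  let st := (PySem.List.pyRange (n : Int) 0 (-1)).foldl
    (fun (st : List (List Nat) × Nat × Nat) b =>
      if 0 < PySem.List.pyGetD diff b 0 then
        (st.1 ++ [pvShift (PySem.List.slice codes (some b) (some (st.2.1 : Int))) st.2.2],
         b.toNat, st.2.2 + PySem.List.pyGetD diff b 0)
      else st) ([], n, 0)
  let out := st.1 ++ [pvShift (PySem.List.slice codes none (some (st.2.1 : Int))) st.2.2]
  String.mk ((out.reverse.flatten).map Char.ofNat)   -- "".join(reversed(out))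

-- ===== PRECONDITION & SPEC =====
def Spec_rollTheString (s : String) (roll : List Int) (out : String) : Prop := out = rollTheString_alt s roll
instance (s : String) (roll : List Int) (out : String) : Decidable (Spec_rollTheString s roll out) := by unfold Spec_rollTheString; infer_instance

-- ===== CLAIM (what is proved, stated in full; the proofs are below) =====
def Claim_equal_rollTheString : Prop := ∀ (s : String) (roll : List Int), Dom_rollTheString s roll → Spec_rollTheString s roll (rollTheString s roll)

-- ===== LEMMAS AND PROOFS =====

-- number of rolls that cover position i (roll r covers positions 0 .. min(r,n)-1)
def pvCov (n : Nat) (roll : List Int) (i : Nat) : Nat :=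
  roll.countP (fun r => decide (0 < r ∧ (i : Int) < min r (n : Int)))

-- per-segment increment count read off the frequency array
def pvDiffD (n : Nat) (roll : List Int) (j : Nat) : Nat :=
  roll.countP (fun r => decide (0 < r ∧ min r (n : Int) = (j : Int)))

lemma pvInner_eq (res : List Nat) (idx : Int) (hidx : idx ≤ (res.length : Int)) :
    pvInnerLoop res idx =
      (res.take idx.toNat).map pvIncCode ++ res.drop idx.toNat := by
  unfold pvInnerLoop
  rw [PySem.List.pyRange_one]
  have h0 : (idx - 0) = idx := by ring
  rw [h0]
  have ht : idx.toNat ≤ res.length := by omega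
  generalize idx.toNat = t at ht ⊢
  induction t with
  | zero => simp
  | succ t ih =>
    rw [List.range_succ, List.map_append, List.foldl_append, ih (by omega)]
    have hlt : t < res.length := by omega
    have htake : ((res.take t).map pvIncCode).length = t := by
      simp [List.length_take]; omega
    simp only [List.map_cons, List.map_nil, List.foldl_cons, List.foldl_nil, zero_add]
    have hget : PySem.List.pyGet? ((res.take t).map pvIncCode ++ res.drop t) ((t : Nat) : Int)
        = some res[t] := by
      rw [PySem.List.pyGet?_natCast, List.getElem?_append_right (by omega)]
      rw [htake, Nat.sub_self, List.getElem?_drop]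
      simp [List.getElem?_eq_getElem hlt]
    rw [hget]
    simp only [Int.toNat_natCast]
    rw [List.set_append]
    simp only [htake, lt_irrefl, if_false, Nat.sub_self]
    rw [List.drop_eq_getElem_cons hlt]
    simp only [List.set_cons_zero]
    rw [show res.take (t+1) = res.take t ++ [res[t]] from by
      rw [List.take_add_one, List.getElem?_eq_getElem hlt]; rfl]
    simp
    rw [List.take_add_one, List.getElem?_map, List.getElem?_eq_getElem hlt]
    simp

lemma pvA_snd (n : Nat) : ∀ (rs : List Int) (a : Int) (res : List Nat), res.length = n →
    ((rs.foldl
      (fun (st : Int × List Nat) r =>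
        (st.1 + r, pvInnerLoop st.2 (min r (n : Int)))) (a, res)).2) =
      (List.range n).map (fun i => pvIncCode^[pvCov n rs i] (res.getD i 0)) := by
  intro rs
  induction rs with
  | nil =>
    intro a res hres
    subst hres
    simp only [List.foldl_nil, pvCov, List.countP_nil, Function.iterate_zero, id_eq]
    apply List.ext_getElem (by simp)
    intro i h1 h2
    simp at h2
    simp [List.getD_eq_getElem?_getD, List.getElem?_eq_getElem h2]
  | cons r rs ih =>
    intro a res hres
    simp only [List.foldl_cons]
    have hidxle : min r (n : Int) ≤ (res.length : Int) := by rw [hres]; omega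
    rw [pvInner_eq res _ hidxle]
    set t : Nat := (min r (n : Int)).toNat with htdef
    have htN : t ≤ n := by omega
    have hlen : ((res.take t).map pvIncCode ++ res.drop t).length = n := by
      simp [List.length_take]; omega
    rw [ih (a + r) _ hlen]
    apply List.map_congr_left
    intro i hi
    rw [List.mem_range] at hi
    have hi' : i < res.length := by omega
    have hval : ((res.take t).map pvIncCode ++ res.drop t).getD i 0
        = if i < t then pvIncCode (res.getD i 0) else res.getD i 0 := by
      rw [List.getD_eq_getElem?_getD]
      by_cases h : i < t
      · rw [List.getElem?_append_left (by simp [List.length_take]; omega)]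
        rw [List.getElem?_map, List.getElem?_take, if_pos h, List.getElem?_eq_getElem hi']
        simp [h, List.getD_eq_getElem?_getD, List.getElem?_eq_getElem hi']
      · rw [List.getElem?_append_right (by simp [List.length_take]; omega)]
        simp only [List.length_map, List.length_take]
        rw [List.getElem?_drop]
        have e : t + (i - min t res.length) = i := by omega
        rw [e, List.getElem?_eq_getElem hi']
        simp [h, List.getD_eq_getElem?_getD, List.getElem?_eq_getElem hi']
    rw [hval]
    have hcov : pvCov n (r :: rs) i =
        pvCov n rs i + (if i < t then 1 else 0) := by
      unfold pvCov
      rw [List.countP_cons]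
      congr 1
      by_cases h : i < t
      · have hp : (0 < r ∧ (i : Int) < min r (n : Int)) := by constructor <;> omega
        simp [h, hp]
      · have hdec : (decide (0 < r ∧ (i : Int) < min r (n : Int))) = false := by
          simp only [decide_eq_false_iff_not]; omega
        rw [hdec]
        simp [h]
    rw [hcov]
    by_cases h : i < t
    · simp only [h, if_true]
      rw [← Function.iterate_succ_apply pvIncCode (pvCov n rs i)]
    · simp [h]

lemma pvDiff_getD (n : Nat) : ∀ (rs : List Int) (d : List Nat), d.length = n + 1 →
    ∀ j : Nat, j ≤ n →
    ((rs.foldl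
      (fun d r =>
        if 0 < r then
          d.set (min r (n : Int)).toNat (d.getD (min r (n : Int)).toNat 0 + 1)
        else d) d).getD j 0) =
      d.getD j 0 + pvDiffD n rs j := by
  intro rs
  induction rs with
  | nil => intro d hd j hj; simp [pvDiffD]
  | cons r rs ih =>
    intro d hd j hj
    simp only [List.foldl_cons, pvDiffD, List.countP_cons]
    by_cases hr : 0 < r
    · simp only [hr, if_true]
      set jr : Nat := (min r (n : Int)).toNat with hjr
      have hjrlt : jr < d.length := by omega
      have hlen : (d.set jr (d.getD jr 0 + 1)).length = n + 1 := by simp [hd]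
      have ih' := ih (d.set jr (d.getD jr 0 + 1)) hlen j hj
      simp only [pvDiffD] at ih'
      rw [ih']
      have hset : (d.set jr (d.getD jr 0 + 1)).getD j 0 =
          d.getD j 0 + (if jr = j then 1 else 0) := by
        rw [List.getD_eq_getElem?_getD, List.getElem?_set]
        by_cases h : jr = j
        · subst h
          rw [if_pos rfl, if_pos hjrlt]
          simp
        · rw [if_neg h, ← List.getD_eq_getElem?_getD]
          simp [h]
      rw [hset]
      have hpred : (if jr = j then (1:Nat) else 0) =
          (if (0 < r ∧ min r (n : Int) = (j : Int)) then 1 else 0) := by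
        by_cases h : jr = j
        · have hm : min r (n : Int) = (j : Int) := by omega
          simp [h, hm, hr]
        · have hm : ¬ (0 < r ∧ min r (n : Int) = (j : Int)) := by omega
          simp [h, hm]
      rw [hpred]
      by_cases hmin : min r (n : Int) = (j : Int)
      · have e1 : (if (0 < r ∧ min r (n : Int) = (j : Int)) then (1:Nat) else 0) = 1 := by
          simp [hr, hmin]
        have e2 : (if decide (True ∧ min r (n : Int) = (j : Int)) = true then (1:Nat) else 0) = 1 := by
          simp [hmin]
        rw [e1, e2]
        omega
      · have e1 : (if (0 < r ∧ min r (n : Int) = (j : Int)) then (1:Nat) else 0) = 0 := by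
          simp [hmin]
        have e2 : (if decide (True ∧ min r (n : Int) = (j : Int)) = true then (1:Nat) else 0) = 0 := by
          simp [hmin]
        rw [e1, e2]
        omega
    · simp only [hr, if_false]
      have ih' := ih d hd j hj
      simp only [pvDiffD] at ih'
      rw [ih']
      simp

lemma pvCov_rec (n : Nat) (roll : List Int) (k : Nat) (_hk : k < n) :
    pvCov n roll k = pvCov n roll (k + 1) + pvDiffD n roll (k + 1) := by
  unfold pvCov pvDiffD
  induction roll with
  | nil => simp
  | cons r rs ih =>
    simp only [List.countP_cons]
    have h : (if (0 < r ∧ (k : Int) < min r (n : Int)) then (1:Nat) else 0) =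
        (if (0 < r ∧ ((k + 1 : Nat) : Int) < min r (n : Int)) then 1 else 0) +
        (if (0 < r ∧ min r (n : Int) = ((k + 1 : Nat) : Int)) then 1 else 0) := by
      split_ifs <;> push_cast at * <;> omega
    simp only [decide_eq_true_eq] at *
    omega

lemma pvBumpIter (k : Nat) : ∀ (o : Nat), pvIncCode^[k] o = pvBump o k := by
  induction k with
  | zero =>
    intro o
    simp only [Function.iterate_zero, id_eq, pvBump]
    rw [if_pos (show 122 < o ∨ o + 0 ≤ 122 by omega)]
    omega
  | succ k ih =>
    intro o
    rw [Function.iterate_succ_apply', ih o]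
    simp only [pvBump, pvIncCode]
    split_ifs <;> omega

lemma pvShift_eq (seg : List Nat) (cnt : Nat) (hseg : ∀ o ∈ seg, o < 127) :
    pvShift seg cnt = seg.map (fun o => pvBump o cnt) := by
  unfold pvShift
  by_cases h : cnt = 0 ∨ seg = []
  · rw [if_pos h]
    rcases h with h | h
    · subst h
      have hb0 : ∀ o : Nat, pvBump o 0 = o := by
        intro o
        unfold pvBump
        rw [if_pos (show 122 < o ∨ o + 0 ≤ 122 by omega)]
        omega
      simp [hb0]
    · subst h; simp
  · rw [if_neg h]
    apply List.map_congr_left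
    intro o ho
    have hlt : o < 127 := hseg o ho
    rw [if_pos hlt, List.getD_eq_getElem?_getD, List.getElem?_map, List.getElem?_range hlt]
    simp

lemma pvCovConst (n : Nat) (roll : List Int) (a pos : Nat) (hpos : pos ≤ n)
    (hzero : ∀ j, a < j → j < pos → pvDiffD n roll j = 0) :
    ∀ m, a + m < pos → pvCov n roll (a + m) = pvCov n roll a := by
  intro m
  induction m with
  | zero => intro _; rfl
  | succ m ih =>
    intro hm
    have h1 : pvCov n roll (a + m) = pvCov n roll (a + m + 1) + pvDiffD n roll (a + m + 1) := by
      exact pvCov_rec n roll (a + m) (by omega)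
    have h2 : pvDiffD n roll (a + m + 1) = 0 := hzero _ (by omega) (by omega)
    have h3 := ih (by omega)
    have e : a + (m + 1) = a + m + 1 := by omega
    rw [e]
    omega

lemma pvSeg_eq (n : Nat) (roll : List Int) (codes : List Nat) (hn : codes.length = n)
    (hcodes : ∀ o ∈ codes, o < 127)
    (a pos : Nat) (ha : a ≤ pos) (hpos : pos ≤ n)
    (hzero : ∀ j, a < j → j < pos → pvDiffD n roll j = 0) :
    pvShift ((codes.drop a).take (pos - a)) (pvCov n roll a) =
      (List.range' a (pos - a)).map
        (fun i => pvBump (codes.getD i 0) (pvCov n roll i)) := by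
  rw [pvShift_eq _ _ (fun o ho => hcodes o (List.mem_of_mem_drop (List.mem_of_mem_take ho)))]
  apply List.ext_getElem
  · simp [List.length_take, List.length_drop, hn]
    omega
  · intro k h1 h2
    simp only [List.getElem_map, List.getElem_take, List.getElem_drop, List.getElem_range']
    have hk : k < pos - a := by
      simp [List.length_take, List.length_drop, hn] at h1; omega
    have hik : a + k < codes.length := by omega
    have e1m : a + 1 * k = a + k := by omega
    rw [e1m]
    have hgd : codes.getD (a + k) 0 = codes[a + k] := by
      simp [List.getD_eq_getElem?_getD, List.getElem?_eq_getElem hik]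
    rw [hgd]
    have hcv : pvCov n roll (a + k) = pvCov n roll a :=
      pvCovConst n roll a pos hpos hzero k (by omega)
    rw [hcv]

lemma pvB_loop (n : Nat) (roll : List Int) (codes : List Nat) (hn : codes.length = n)
    (hcodes : ∀ o ∈ codes, o < 127) (diff : List Nat)
    (hd : ∀ j : Nat, j ≤ n → diff.getD j 0 = pvDiffD n roll j) :
    ∀ (b : Nat), b ≤ n → ∀ (out : List (List Nat)) (pos : Nat), b ≤ pos → pos ≤ n →
    (∀ j, b < j → j < pos → pvDiffD n roll j = 0) →
    ((let st := (PySem.List.pyRange (b : Int) 0 (-1)).foldl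
        (fun (st : List (List Nat) × Nat × Nat) b =>
          if 0 < PySem.List.pyGetD diff b 0 then
            (st.1 ++ [pvShift (PySem.List.slice codes (some b) (some (st.2.1 : Int))) st.2.2],
             b.toNat, st.2.2 + PySem.List.pyGetD diff b 0)
          else st) (out, pos, pvCov n roll b);
      ((st.1 ++ [pvShift (codes.take st.2.1) st.2.2]).reverse.flatten : List Nat))) =
    (List.range pos).map (fun i => pvBump (codes.getD i 0) (pvCov n roll i)) ++
      out.reverse.flatten := by
  intro b
  induction b with
  | zero =>
    intro _ out pos hbp hpn hzero
    rw [PySem.List.pyRange_neg_one_eq_nil (by omega)]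
    simp only [List.foldl_nil]
    have hseg := pvSeg_eq n roll codes hn hcodes 0 pos (by omega) hpn
      (fun j h1 h2 => hzero j h1 h2)
    simp only [List.drop_zero, Nat.sub_zero] at hseg
    rw [hseg, List.range_eq_range']
    simp
  | succ b ih =>
    intro hb1 out pos hbp hpn hzero
    rw [show (((b+1 : Nat)) : Int) = (b : Int) + 1 by push_cast; ring]
    rw [PySem.List.pyRange_neg_one_cons (by omega)]
    rw [show ((b : Int) + 1 - 1) = (b : Int) by ring]
    simp only [List.foldl_cons]
    rw [show ((b : Int) + 1) = (((b+1 : Nat)) : Int) by push_cast; ring]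
    simp only [PySem.List.pyGetD_natCast, Int.toNat_natCast]
    rw [hd (b+1) (by omega)]
    by_cases hdz : 0 < pvDiffD n roll (b+1)
    · rw [if_pos hdz]
      rw [PySem.List.slice_toNat codes (by omega) (by omega)]
      simp only [Int.toNat_natCast]
      have hc : pvCov n roll (b+1) + pvDiffD n roll (b+1) = pvCov n roll b :=
        (pvCov_rec n roll b (by omega)).symm
      rw [hc]
      rw [ih (by omega) _ (b+1) (by omega) (by omega) (fun j h1 h2 => by omega)]
      have hseg := pvSeg_eq n roll codes hn hcodes (b+1) pos hbp hpn
        (fun j h1 h2 => hzero j (by omega) h2)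
      rw [hseg]
      simp only [List.reverse_append, List.reverse_cons, List.reverse_nil, List.nil_append,
        List.flatten_cons, List.singleton_append]
      rw [← List.append_assoc, ← List.map_append]
      have hrr : List.range (b+1) ++ List.range' (b+1) (pos-(b+1)) = List.range pos := by
        rw [List.range_eq_range', List.range_eq_range']
        have e := List.range'_append_1 (s := 0) (m := b+1) (n := pos-(b+1))
        simp only [Nat.zero_add] at e
        rw [e]
        congr 1
        omega
      rw [hrr]
    · rw [if_neg hdz]
      have hc : pvCov n roll (b+1) = pvCov n roll b := by
        have hrec := pvCov_rec n roll b (by omega)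
        have hz2 : pvDiffD n roll (b+1) = 0 := Nat.eq_zero_of_not_pos hdz
        omega
      rw [hc]
      exact ih (by omega) out pos (by omega) hpn
        (fun j h1 h2 => by
          by_cases hj : j = b + 1
          · subst hj; omega
          · exact hzero j (by omega) h2)

-- ===== VERDICT (by name: the statement is the Claim_ definition above) =====
theorem rollTheString_spec : Claim_equal_rollTheString := by
  unfold Claim_equal_rollTheString Spec_rollTheString
  intro s roll hdom
  unfold rollTheString rollTheString_alt
  simp only [List.length_map]
  set cs := s.toList with hcs
  set codes := cs.map Char.toNat with hcodesdef
  set n := cs.length with hn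
  have hnc : codes.length = n := by simp [hcodesdef, hn]
  have hminr : ∀ r : Int, (if r < (n : Int) then r else (n : Int)) = min r (n : Int) := by
    intro r
    rcases lt_or_ge r (n : Int) with h | h <;> simp [min_def] <;> omega
  simp only [hminr]
  rw [pvA_snd n roll 0 codes hnc]
  have hcodes127 : ∀ o ∈ codes, o < 127 := by
    intro o ho
    rw [hcodesdef] at ho
    obtain ⟨c, hc, rfl⟩ := List.mem_map.mp ho
    have hall : pvDomStr s = true := by
      have h := hdom
      unfold Dom_rollTheString at h
      rw [Bool.and_eq_true] at h
      exact h.1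
    unfold pvDomStr at hall
    have := (List.all_eq_true.mp hall) c hc
    unfold pvDomChar at this
    simp only [Bool.or_eq_true, Bool.and_eq_true, beq_iff_eq, decide_eq_true_eq] at this
    omega
  have hdiff : ∀ j : Nat, j ≤ n →
      (roll.foldl
        (fun d r =>
          if 0 < r then
            d.set (min r (n : Int)).toNat (d.getD (min r (n : Int)).toNat 0 + 1)
          else d) (List.replicate (n + 1) 0)).getD j 0 = pvDiffD n roll j := by
    intro j hj
    rw [pvDiff_getD n roll _ (by simp) j hj]
    rw [List.getD_eq_getElem?_getD, List.getElem?_replicate, if_pos (by omega : j < n + 1)]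
    simp
  have h0 : pvCov n roll n = 0 := by
    unfold pvCov
    rw [List.countP_eq_zero]
    intro r _
    simp only [decide_eq_true_eq]
    omega
  have hB := pvB_loop n roll codes hnc hcodes127 _ hdiff n (le_refl n) [] n (le_refl n)
    (le_refl n) (fun j h1 h2 => by omega)
  rw [h0] at hB
  simp only [] at hB
  rw [PySem.List.slice_to_natCast] at *
  rw [hB]
  simp only [List.reverse_nil, List.flatten_nil, List.append_nil]
  congr 2
  apply List.map_congr_left
  intro i _
  rw [pvBumpIter]
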